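-- pv_equiv track=rewrite | github.com/alexcabezas1/survey-analyzer | app.py | explode_groups_def
-- ===== SOURCE A (Python) =====
-- def explode_groups_def(group_def):
--     for line in group_def:
--         if len(line) == 0:
--             continue
--         path = ''
--         group = line.split(",")
--         for gr in group:
--             path += gr + ","
--             yield path[:-1]
-- ===== SOURCE B (Python) =====
-- def explode_groups_def(group_def):
--     for line in group_def:
--         if len(line) == 0:
--             continue
--         groups = line.split(",")
--         for i in range(1, len(groups) + 1):
--             yield ",".join(groups[:i])
-- ===== Notes on version B (the rewrite author's own statement) =====
-- stated objective: alternative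
-- what changed: Replaces the threaded string accumulator (path += gr + ','; yield path[:-1]) with an index loop that recomputes each comma-joined prefix independently via ','.join(groups[:i]).
import Mathlib
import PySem

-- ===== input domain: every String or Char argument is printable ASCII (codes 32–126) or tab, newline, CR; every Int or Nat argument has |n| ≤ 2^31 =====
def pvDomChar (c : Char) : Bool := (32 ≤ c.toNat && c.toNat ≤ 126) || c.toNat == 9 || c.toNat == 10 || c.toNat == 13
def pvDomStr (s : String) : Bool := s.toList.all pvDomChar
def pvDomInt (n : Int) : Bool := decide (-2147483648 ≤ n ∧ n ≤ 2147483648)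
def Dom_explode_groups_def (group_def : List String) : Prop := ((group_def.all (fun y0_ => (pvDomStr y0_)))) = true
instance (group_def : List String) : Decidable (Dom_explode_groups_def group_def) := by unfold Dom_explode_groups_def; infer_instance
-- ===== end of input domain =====

-- B replaces A's threaded string accumulator with an index loop that recomputes
-- each comma-joined prefix independently (objective: alternative decomposition).

-- ===== PORT A =====
-- inner loop: for gr in group: path += gr + ","; yield path[:-1]
def pvInnerA (st : String × List String) (gr : String) : String × List String :=
  let path := st.1 ++ gr ++ ","
  (path, st.2 ++ [PySem.Str.slice path none (some (-1))])

def explode_groups_def (group_def : List String) : List String :=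
  group_def.foldl (fun out line =>
    if PySem.Str.len line == 0 then out
    else
      (((PySem.Chars.splitOn line.toList [',']).map String.ofList).foldl pvInnerA ("", out)).2) []

-- ===== PORT B =====
def explode_groups_def_alt (group_def : List String) : List String :=
  group_def.foldl (fun out line =>
    if PySem.Str.len line == 0 then out
    else
      out ++ (PySem.List.pyRange 1 ((((PySem.Chars.splitOn line.toList [',']).map String.ofList).length : Int) + 1) 1).map
        (fun i => PySem.Str.join "," (PySem.List.slice ((PySem.Chars.splitOn line.toList [',']).map String.ofList) none (some i)))) []

-- ===== PRECONDITION & SPEC =====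
def Spec_explode_groups_def (group_def : List String) (out : List String) : Prop := out = explode_groups_def_alt group_def
instance (group_def : List String) (out : List String) : Decidable (Spec_explode_groups_def group_def out) := by unfold Spec_explode_groups_def; infer_instance

-- ===== CLAIM (what is proved, stated in full; the proofs are below) =====
def Claim_equal_explode_groups_def : Prop := ∀ (group_def : List String), Dom_explode_groups_def group_def → Spec_explode_groups_def group_def (explode_groups_def group_def)

-- ===== LEMMAS AND PROOFS =====

-- A's inner fold: from state (path, out) it appends, for each j < gs.length,
-- path ++ ",".join of the first j+1 groups.
theorem innerA_spec (gs : List String) (path : List Char) (out : List String) :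
    (gs.foldl pvInnerA (String.ofList path, out)).2 =
      out ++ (List.range gs.length).map
        (fun j => String.ofList (path ++ PySem.Chars.join [','] ((gs.take (j+1)).map String.toList))) := by
  induction gs generalizing path out with
  | nil => simp
  | cons g rest ih =>
    have hstep : pvInnerA (String.ofList path, out) g
        = (String.ofList (path ++ g.toList ++ [',']),
           out ++ [String.ofList (path ++ g.toList)]) := by
      simp only [pvInnerA]
      refine Prod.ext ?_ ?_
      · apply String.toList_inj.mp
        simp
      · simp only []
        congr 1
        apply (List.cons_eq_cons).mpr
        refine ⟨?_, rfl⟩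
        apply String.toList_inj.mp
        rw [PySem.Str.slice_to_neg_one]
        have h2 : (String.ofList path ++ g ++ ",").toList = path ++ g.toList ++ [','] := by simp
        rw [h2, String.toList_ofList]
        simp
    simp only [List.foldl_cons, hstep, ih]
    simp only [List.length_cons]
    rw [List.range_succ_eq_map]
    simp only [List.map_cons, List.map_map]
    rw [List.append_assoc]
    congr 1
    simp only [List.singleton_append]
    congr 1
    · congr 1
      simp [PySem.Chars.join_singleton]
    · apply List.map_congr_left
      intro j hj
      simp only [Function.comp_apply]
      congr 1
      have htake : (g :: rest).take (j + 1 + 1) = g :: rest.take (j + 1) := rfl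
      rw [htake]
      have hne : rest.take (j + 1) ≠ [] := by
        simp only [List.mem_range] at hj
        have hpos : 0 < (rest.take (j + 1)).length := by
          simp only [List.length_take]
          omega
        exact List.ne_nil_of_length_pos hpos
      obtain ⟨r0, rs, hr⟩ := List.exists_cons_of_ne_nil hne
      simp only [List.map_cons, hr]
      rw [PySem.Chars.join_cons_cons]
      simp [List.append_assoc]

-- B's per-line map in the same normal form.
theorem rangeB_spec (gs : List String) :
    (PySem.List.pyRange 1 ((gs.length : Int) + 1) 1).map
        (fun i => PySem.Str.join "," (PySem.List.slice gs none (some i))) =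
      (List.range gs.length).map
        (fun j => String.ofList (PySem.Chars.join [','] ((gs.take (j+1)).map String.toList))) := by
  rw [PySem.List.pyRange_one]
  have : ((gs.length : Int) + 1 - 1).toNat = gs.length := by omega
  rw [this, List.map_map]
  apply List.map_congr_left
  intro j _
  simp only [Function.comp_apply]
  apply String.toList_inj.mp
  have hcast : (1 : Int) + (j : Int) = ((j + 1 : Nat) : Int) := by push_cast; ring
  rw [hcast, PySem.List.slice_to_natCast, PySem.Str.toList_join]
  simp

-- ===== VERDICT (by name: the statement is the Claim_ definition above) =====
theorem explode_groups_def_spec : Claim_equal_explode_groups_def := by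
  intro group_def _
  unfold Spec_explode_groups_def explode_groups_def explode_groups_def_alt
  apply PySem.List.foldl_congr_mem
  intro out line _
  split_ifs with h
  · rfl
  · have hi := innerA_spec ((PySem.Chars.splitOn line.toList [',']).map String.ofList) [] out
    simp only [List.nil_append] at hi
    rw [show ("" : String) = String.ofList [] from rfl, hi, rangeB_spec]
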